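-- pv_equiv track=rewrite | github.com/ERC-BIG-5/platform-clients | src/clients/config_file_creation_helper.py | fit_into_config_data
-- ===== SOURCE A (Python) =====
-- from typing import Optional, Generator
--
-- def fit_into_config_data(config_data: dict, config_generator: Generator[dict[str, str], None, None]) -> dict:
--     conf = config_data["collection_config"]
--     for idx, gen_step in enumerate(config_generator):
--         if idx >= len(conf):
--             conf.append(gen_step)
--         else:
--             conf[idx].update(gen_step)
--     return config_data
-- ===== SOURCE B (Python) =====
-- def fit_into_config_data(config_data: dict, config_generator) -> dict:
--     def merge(conf, steps):
--         if not steps: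
--             return conf
--         if not conf:
--             return steps
--         return [{**conf[0], **steps[0]}] + merge(conf[1:], steps[1:])
--     config_data["collection_config"] = merge(
--         config_data["collection_config"], list(config_generator))
--     return config_data
-- ===== Notes on version B (the rewrite author's own statement) =====
-- stated objective: alternative
-- what changed: Replaces A's in-place indexed enumerate loop (branching on idx >= len(conf) to either mutate conf[idx] or append) with a pure structurally recursive merge of the two lists that builds a fresh list of merged dicts ({**a, **b}) and reassigns the key; equivalence is about the return value (A mutates conf and its inner dicts in place, B does not).
import Mathlib
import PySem

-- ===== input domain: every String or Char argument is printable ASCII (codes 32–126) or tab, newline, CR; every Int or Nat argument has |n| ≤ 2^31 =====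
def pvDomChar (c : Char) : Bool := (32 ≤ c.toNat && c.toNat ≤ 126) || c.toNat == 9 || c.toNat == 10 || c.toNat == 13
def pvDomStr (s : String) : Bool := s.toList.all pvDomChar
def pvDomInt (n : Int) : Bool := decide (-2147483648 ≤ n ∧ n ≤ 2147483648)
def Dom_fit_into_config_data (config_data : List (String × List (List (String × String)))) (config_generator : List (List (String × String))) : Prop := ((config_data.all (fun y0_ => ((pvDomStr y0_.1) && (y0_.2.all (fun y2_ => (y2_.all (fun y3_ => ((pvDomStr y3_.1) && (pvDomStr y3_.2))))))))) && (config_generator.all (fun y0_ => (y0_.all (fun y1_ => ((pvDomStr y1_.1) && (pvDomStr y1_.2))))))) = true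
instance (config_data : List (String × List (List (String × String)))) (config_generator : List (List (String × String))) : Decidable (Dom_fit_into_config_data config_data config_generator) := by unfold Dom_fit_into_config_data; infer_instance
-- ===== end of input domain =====

-- B replaces A's in-place indexed enumerate loop by a pure structurally recursive merge of the
-- two lists ({**a, **b} per pair) reassigned to the key; same return value, different decomposition.
-- A mutates config_data's list and inner dicts in place (B does not); the equivalence proved here
-- is about the return value only.


-- ===== PORT A =====
-- `d.update(g)` on an inner dict (A's conf[idx].update(gen_step))
def dictUpd (d g : List (String × String)) : List (String × String) :=
  ((PySem.Dict.mk d).update g).items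

-- enumerate indices are ≥ 0, so `.toNat` on them is exact.
def fit_into_config_data (config_data : List (String × List (List (String × String)))) (config_generator : List (List (String × String))) : List (String × List (List (String × String))) :=
  match (PySem.Dict.mk config_data).get? "collection_config" with
  | none => config_data   -- Python raises KeyError here; excluded by Pre_
  | some conf0 =>
    let conf := (PySem.List.enumerate config_generator 0).foldl
      (fun c ig =>
        if (c.length : Int) ≤ ig.1 then c ++ [ig.2]
        else c.set ig.1.toNat (dictUpd (c.getD ig.1.toNat []) ig.2)) conf0
    ((PySem.Dict.mk config_data).insert "collection_config" conf).items

-- ===== PORT B =====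
-- `{**a, **b}` builds a fresh dict from a updated with b: same value as dictUpd.
-- B's recursive merge: branch order follows Source B (steps empty first, then conf empty).
def mergeB : List (List (String × String)) → List (List (String × String)) → List (List (String × String))
  | conf, [] => conf
  | [], s :: ss => s :: ss
  | c :: cs, s :: ss => dictUpd c s :: mergeB cs ss

def fit_into_config_data_alt (config_data : List (String × List (List (String × String)))) (config_generator : List (List (String × String))) : List (String × List (List (String × String))) :=
  match (PySem.Dict.mk config_data).get? "collection_config" with
  | none => config_data   -- Python raises KeyError here; excluded by Pre_
  | some conf0 =>
    ((PySem.Dict.mk config_data).insert "collection_config" (mergeB conf0 config_generator)).items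

-- ===== PRECONDITION & SPEC =====
-- Pre_ excludes exactly the inputs without a "collection_config" key, on which both Pythons raise KeyError.
def Pre_fit_into_config_data (config_data : List (String × List (List (String × String)))) (config_generator : List (List (String × String))) : Prop :=
  (PySem.Dict.mk config_data).contains "collection_config" = true
instance (config_data : List (String × List (List (String × String)))) (config_generator : List (List (String × String))) : Decidable (Pre_fit_into_config_data config_data config_generator) := by unfold Pre_fit_into_config_data; infer_instance

def pvWitness_fit_into_config_data : (List (String × List (List (String × String)))) × (List (List (String × String))) :=
  ([("collection_config", [[("a", "x")]])], [[("a", "y")], [("b", "z")]])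

def Spec_fit_into_config_data (config_data : List (String × List (List (String × String)))) (config_generator : List (List (String × String))) (out : List (String × List (List (String × String)))) : Prop := out = fit_into_config_data_alt config_data config_generator
instance (config_data : List (String × List (List (String × String)))) (config_generator : List (List (String × String))) (out : List (String × List (List (String × String)))) : Decidable (Spec_fit_into_config_data config_data config_generator out) := by unfold Spec_fit_into_config_data; infer_instance

-- ===== CLAIM (what is proved, stated in full; the proofs are below) =====
def Claim_equal_fit_into_config_data : Prop := ∀ (config_data : List (String × List (List (String × String)))) (config_generator : List (List (String × String))), Dom_fit_into_config_data config_data config_generator → Pre_fit_into_config_data config_data config_generator → Spec_fit_into_config_data config_data config_generator (fit_into_config_data config_data config_generator)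

-- ===== LEMMAS AND PROOFS =====

theorem pv_take_succ {α : Type} {l : List α} {i : Nat} (h : i < l.length) :
    l.take (i + 1) = l.take i ++ [l[i]] := by
  rw [List.take_add_one]
  simp [List.getElem?_eq_getElem h]

-- B's recursive merge in closed form.
theorem mergeB_eq (cs gs : List (List (String × String))) :
    mergeB cs gs = List.zipWith dictUpd cs gs ++ cs.drop gs.length ++ gs.drop cs.length := by
  induction cs generalizing gs with
  | nil => cases gs <;> simp [mergeB]
  | cons c cs ih =>
    cases gs with
    | nil => simp [mergeB]
    | cons g gs => simp [mergeB, ih]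

-- A's loop, started at index i (with i ≤ c.length, as the loop maintains), updates the
-- part of c past i pointwise with the generator steps and appends the overhang.
theorem loopA (gs : List (List (String × String))) :
    ∀ (cs : List (List (String × String))) (i : Nat), i ≤ cs.length →
    (PySem.List.enumerate gs (i : Int)).foldl
      (fun cs ig =>
        if (cs.length : Int) ≤ ig.1 then cs ++ [ig.2]
        else cs.set ig.1.toNat (dictUpd (cs.getD ig.1.toNat []) ig.2)) cs
    = cs.take i ++ List.zipWith dictUpd (cs.drop i) gs
        ++ (cs.drop i).drop gs.length ++ gs.drop (cs.drop i).length := by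
  induction gs with
  | nil =>
    intro cs i hi
    simp [PySem.List.enumerate]
  | cons g gs ih =>
    intro cs i hi
    rw [PySem.List.enumerate_cons, List.foldl_cons]
    rcases Nat.lt_or_ge i cs.length with hlt | hge
    · have hcond : ¬ ((cs.length : Int) ≤ (i : Int)) := by exact_mod_cast Nat.not_le.mpr hlt
      have htoNat : ((i : Int)).toNat = i := Int.toNat_natCast i
      simp only [hcond, if_false, htoNat]
      have hcast : ((i : Int) + 1) = ((i + 1 : Nat) : Int) := by push_cast; ring
      rw [hcast, ih (cs.set i (dictUpd (cs.getD i []) g)) (i + 1) (by simpa using Nat.succ_le_of_lt hlt)]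
      have hget : cs.getD i [] = cs[i] := List.getD_eq_getElem cs [] hlt
      have hdropset : (cs.set i (dictUpd (cs[i]) g)).drop (i + 1) = cs.drop (i + 1) := by
        rw [List.drop_set]; simp
      have htakeset : (cs.set i (dictUpd (cs[i]) g)).take (i + 1)
          = cs.take i ++ [dictUpd (cs[i]) g] := by
        rw [List.take_set]
        rw [pv_take_succ hlt]
        rw [List.set_append_right _ _ (by simp)]
        simp [Nat.min_eq_left (le_of_lt hlt)]
      rw [hget, htakeset, hdropset]
      rw [List.drop_eq_getElem_cons hlt]
      simp only [List.zipWith, List.length_cons, List.length_drop]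
      simp [List.drop_succ_cons]
      omega
    · have hieq : i = cs.length := Nat.le_antisymm hi hge
      have hcond : ((cs.length : Int) ≤ (i : Int)) := by exact_mod_cast hge
      simp only [hcond, if_true]
      have hcast : ((i : Int) + 1) = ((i + 1 : Nat) : Int) := by push_cast; ring
      rw [hcast, ih (cs ++ [g]) (i + 1) (by simp [hieq])]
      subst hieq
      rw [List.take_of_length_le (by simp)]
      simp

-- ===== VERDICT (by name: the statement is the Claim_ definition above) =====
theorem fit_into_config_data_spec : Claim_equal_fit_into_config_data := by
  intro cd cg _ hpre
  unfold Spec_fit_into_config_data fit_into_config_data fit_into_config_data_alt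
  cases hget : (PySem.Dict.mk cd).get? "collection_config" with
  | none =>
    simp_all [Pre_fit_into_config_data, PySem.Dict.get?_eq_none_iff_contains]
  | some conf0 =>
    simp only []
    have := loopA cg conf0 0 (Nat.zero_le _)
    simp only [Int.natCast_zero] at this
    rw [this, mergeB_eq]
    simp
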